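-- pv_equiv track=rewrite | github.com/nabilbaugher/mst | mst_prototype.py | map_builder
-- ===== SOURCE A (Python) =====
-- def map_builder(nrows, ncols, black, path, start):
--     """
--     This function turns a description of a map into its representation: a tuple of tuples, representing a grid.
--     Each position on this grid is a "tile".
--
--     Parameters
--     ----------
--     nrows : int. Number of rows
--     ncols : int. Number of columns
--
--     black : list of tuples (int, int)
--         The tiles our player has not viewed yet.
--     path :  list of tuples (int, int)
--         The tiles which are part of our path.
--     start : tuple (int, int).
--         Our starting position on the map.
--
--     Returns
--     -------
--     tuple of tuples
--         A representation of our map, where different values represent different tile types.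
--
--     """
--
--     return tuple(
--                 tuple(     5 if (i ,j) == start  #Start tiles
--                       else 6 if (i ,j) in path   #Path tiles
--                       else 0 if (i ,j) in black  #Unseen tiles
--                       else 3                     #Wall tiles (?)
--                       for j in range(ncols)
--                      )
--                 for i in range(nrows)
--                 )
-- ===== SOURCE B (Python) =====
-- def map_builder(nrows, ncols, black, path, start):
--     # Scatter-write into a wall-filled grid, in priority order: black, then path, then start.
--     grid = [[3] * ncols for _ in range(nrows)]
--
--     def put(pos, val):
--         i, j = pos
--         if 0 <= i < nrows and 0 <= j < ncols:
--             grid[i][j] = val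
--
--     for pos in black:
--         put(pos, 0)
--     for pos in path:
--         put(pos, 6)
--     put(start, 5)
--     return tuple(tuple(row) for row in grid)
-- ===== Notes on version B (the rewrite author's own statement) =====
-- stated objective: faster
-- what changed: Instead of testing every grid cell for membership in path/black (an inner list scan per cell), B fills the whole grid with walls once and scatter-writes the sparse black/path/start coordinates in priority order (start overwrites path overwrites black).
import Mathlib
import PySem

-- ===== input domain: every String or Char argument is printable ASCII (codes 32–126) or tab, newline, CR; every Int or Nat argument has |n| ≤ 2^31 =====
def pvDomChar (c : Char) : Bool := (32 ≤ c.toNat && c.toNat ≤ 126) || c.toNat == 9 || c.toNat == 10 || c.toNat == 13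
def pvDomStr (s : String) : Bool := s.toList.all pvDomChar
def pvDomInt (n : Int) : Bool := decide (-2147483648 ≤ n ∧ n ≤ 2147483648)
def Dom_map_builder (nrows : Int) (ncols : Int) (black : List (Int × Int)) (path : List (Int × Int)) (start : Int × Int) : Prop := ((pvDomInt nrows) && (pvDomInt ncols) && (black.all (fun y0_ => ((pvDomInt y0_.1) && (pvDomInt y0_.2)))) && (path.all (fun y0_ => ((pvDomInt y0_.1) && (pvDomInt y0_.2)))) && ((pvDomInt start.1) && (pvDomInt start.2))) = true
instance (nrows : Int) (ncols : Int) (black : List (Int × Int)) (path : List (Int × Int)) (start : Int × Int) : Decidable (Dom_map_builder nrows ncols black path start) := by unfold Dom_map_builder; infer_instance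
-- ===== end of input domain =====

-- B replaces A's per-cell membership scans by one wall-filled grid plus sparse scatter-writes
-- (black, then path, then start, so later writes win); objective: faster.

-- ===== PORT A =====
-- A: nested comprehension over range(nrows) × range(ncols), with a chained conditional per cell.
def map_builder (nrows : Int) (ncols : Int) (black : List (Int × Int)) (path : List (Int × Int)) (start : Int × Int) : List (List Int) :=
  (PySem.List.pyRange 0 nrows 1).map (fun i =>
    (PySem.List.pyRange 0 ncols 1).map (fun j =>
      if (i, j) = start then 5
      else if (i, j) ∈ path then 6
      else if (i, j) ∈ black then 0
      else 3))

-- ===== PORT B =====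
-- Source B's `put`: guarded in-place write grid[i][j] = val (out-of-range coordinates ignored).
def pvPut (nrows ncols : Int) (g : List (List Int)) (pos : Int × Int) (v : Int) : List (List Int) :=
  if 0 ≤ pos.1 ∧ pos.1 < nrows ∧ 0 ≤ pos.2 ∧ pos.2 < ncols then
    g.modify pos.1.toNat (fun row => row.set pos.2.toNat v)
  else g

def map_builder_alt (nrows : Int) (ncols : Int) (black : List (Int × Int)) (path : List (Int × Int)) (start : Int × Int) : List (List Int) :=
  let g0 := (PySem.List.pyRange 0 nrows 1).map (fun _ => List.replicate ncols.toNat 3)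
  let g1 := black.foldl (fun g p => pvPut nrows ncols g p 0) g0
  let g2 := path.foldl (fun g p => pvPut nrows ncols g p 6) g1
  pvPut nrows ncols g2 start 5

-- ===== PRECONDITION & SPEC =====
def Spec_map_builder (nrows : Int) (ncols : Int) (black : List (Int × Int)) (path : List (Int × Int)) (start : Int × Int) (out : List (List Int)) : Prop := out = map_builder_alt nrows ncols black path start
instance (nrows : Int) (ncols : Int) (black : List (Int × Int)) (path : List (Int × Int)) (start : Int × Int) (out : List (List Int)) : Decidable (Spec_map_builder nrows ncols black path start out) := by unfold Spec_map_builder; infer_instance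

-- ===== CLAIM (what is proved, stated in full; the proofs are below) =====
def Claim_equal_map_builder : Prop := ∀ (nrows : Int) (ncols : Int) (black : List (Int × Int)) (path : List (Int × Int)) (start : Int × Int), Dom_map_builder nrows ncols black path start → Spec_map_builder nrows ncols black path start (map_builder nrows ncols black path start)

-- ===== LEMMAS AND PROOFS =====

-- cell access: g[i][j] as an Option
def pvCell (g : List (List Int)) (i j : Nat) : Option Int := g[i]?.bind (fun r => r[j]?)

theorem pvPut_length (nrows ncols : Int) (g : List (List Int)) (p : Int × Int) (v : Int) :
    (pvPut nrows ncols g p v).length = g.length := by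
  unfold pvPut; split_ifs <;> simp

theorem pvPut_rows (nrows ncols : Int) (g : List (List Int)) (p : Int × Int) (v : Int)
    (h : ∀ r ∈ g, r.length = ncols.toNat) :
    ∀ r ∈ pvPut nrows ncols g p v, r.length = ncols.toNat := by
  unfold pvPut; split_ifs with hg
  · intro r hr
    rcases List.mem_iff_getElem.mp hr with ⟨k, hk, rfl⟩
    rw [List.getElem_modify]
    split_ifs
    · simp [h _ (List.getElem_mem (by simpa using hk))]
    · exact h _ (List.getElem_mem _)
  · exact h

theorem pvPut_cell (nrows ncols : Int) (g : List (List Int)) (p : Int × Int) (v : Int)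
    (i j : Nat) (h : ∀ r ∈ g, r.length = ncols.toNat) :
    pvCell (pvPut nrows ncols g p v) i j =
      if (0 ≤ p.1 ∧ p.1 < nrows ∧ 0 ≤ p.2 ∧ p.2 < ncols) ∧ p.1.toNat = i ∧ p.2.toNat = j ∧ i < g.length
      then some v else pvCell g i j := by
  unfold pvPut pvCell
  by_cases hg : 0 ≤ p.1 ∧ p.1 < nrows ∧ 0 ≤ p.2 ∧ p.2 < ncols
  · rw [if_pos hg, List.getElem?_modify]
    by_cases hi : p.1.toNat = i
    · subst hi
      by_cases hlen : p.1.toNat < g.length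
      · rw [List.getElem?_eq_getElem hlen]
        have hr := h _ (List.getElem_mem hlen)
        by_cases hj2 : p.2.toNat = j
        · subst hj2
          have hjr : p.2.toNat < g[p.1.toNat].length := by omega
          simp [hg, hlen, hjr]
        · simp [hj2, hg, hlen]
      · rw [List.getElem?_eq_none (by omega)]
        rw [if_neg (by rintro ⟨-, -, -, hl⟩; exact hlen hl)]
        simp
    · rw [if_neg (by rintro ⟨-, hl, -⟩; exact hi hl)]
      simp [hi]
  · rw [if_neg hg, if_neg (by rintro ⟨hl, -⟩; exact hg hl)]

-- after scatter-writing every point of pts with value v, a cell holds v iff some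
-- in-bounds point of pts hits it; otherwise it is unchanged
theorem pvFold_cell (nrows ncols : Int) (pts : List (Int × Int)) (v : Int)
    (g : List (List Int)) (i j : Nat) (h : ∀ r ∈ g, r.length = ncols.toNat) :
    pvCell (pts.foldl (fun g p => pvPut nrows ncols g p v) g) i j =
      if ∃ p ∈ pts, (0 ≤ p.1 ∧ p.1 < nrows ∧ 0 ≤ p.2 ∧ p.2 < ncols) ∧ p.1.toNat = i ∧ p.2.toNat = j ∧ i < g.length
      then some v else pvCell g i j := by
  induction pts generalizing g with
  | nil => simp
  | cons p ps ih =>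
    simp only [List.foldl_cons]
    rw [ih _ (pvPut_rows _ _ _ _ _ h), pvPut_cell _ _ _ _ _ _ _ h, pvPut_length]
    by_cases hp : (0 ≤ p.1 ∧ p.1 < nrows ∧ 0 ≤ p.2 ∧ p.2 < ncols) ∧ p.1.toNat = i ∧ p.2.toNat = j ∧ i < g.length
    · rw [if_pos hp, ite_self, if_pos ⟨p, List.mem_cons_self, hp⟩]
    · rw [if_neg hp]
      by_cases h2 : ∃ q ∈ ps, (0 ≤ q.1 ∧ q.1 < nrows ∧ 0 ≤ q.2 ∧ q.2 < ncols) ∧ q.1.toNat = i ∧ q.2.toNat = j ∧ i < g.length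
      · obtain ⟨q, hq, hh⟩ := h2
        rw [if_pos ⟨q, hq, hh⟩, if_pos ⟨q, List.mem_cons_of_mem _ hq, hh⟩]
      · rw [if_neg h2, if_neg ?_]
        rintro ⟨q, hq, hh⟩
        rcases List.mem_cons.mp hq with rfl | hq'
        · exact hp hh
        · exact h2 ⟨q, hq', hh⟩

theorem pvG0_rows (nrows ncols : Int) :
    ∀ r ∈ (PySem.List.pyRange 0 nrows 1).map (fun _ => List.replicate ncols.toNat (3:Int)), r.length = ncols.toNat := by
  intro r hr
  rcases List.mem_map.mp hr with ⟨k, -, rfl⟩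
  simp

theorem pvFold_rows (nrows ncols : Int) (pts : List (Int × Int)) (v : Int)
    (g : List (List Int)) (h : ∀ r ∈ g, r.length = ncols.toNat) :
    ∀ r ∈ pts.foldl (fun g p => pvPut nrows ncols g p v) g, r.length = ncols.toNat := by
  induction pts generalizing g with
  | nil => exact h
  | cons p ps ih => exact ih _ (pvPut_rows _ _ _ _ _ h)

theorem pvFold_length (nrows ncols : Int) (pts : List (Int × Int)) (v : Int)
    (g : List (List Int)) :
    (pts.foldl (fun g p => pvPut nrows ncols g p v) g).length = g.length := by
  induction pts generalizing g with
  | nil => rfl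
  | cons p ps ih => rw [List.foldl_cons, ih, pvPut_length]

-- translate "in-bounds Nat coordinates hit by Int point p" into plain Int equality
theorem pvHit_iff (nrows ncols : Int) (p : Int × Int) (i j : Nat)
    (hi : i < nrows.toNat) (hj : j < ncols.toNat) :
    ((0 ≤ p.1 ∧ p.1 < nrows ∧ 0 ≤ p.2 ∧ p.2 < ncols) ∧ p.1.toNat = i ∧ p.2.toNat = j ∧ i < nrows.toNat)
      ↔ p = ((i : Int), (j : Int)) := by
  constructor
  · rintro ⟨⟨h1, h2, h3, h4⟩, hx, hy, -⟩
    have : p.1 = (i : Int) := by omega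
    have : p.2 = (j : Int) := by omega
    exact Prod.ext (by omega) (by omega)
  · rintro rfl
    refine ⟨⟨by positivity, by omega, by positivity, by omega⟩, by simp, by simp, hi⟩

-- B's final grid, cell by cell
theorem pvAlt_cell (nrows ncols : Int) (black path : List (Int × Int)) (start : Int × Int)
    (i j : Nat) (hi : i < nrows.toNat) (hj : j < ncols.toNat) :
    pvCell (map_builder_alt nrows ncols black path start) i j =
      some (if ((i : Int), (j : Int)) = start then 5
            else if ((i : Int), (j : Int)) ∈ path then 6
            else if ((i : Int), (j : Int)) ∈ black then 0
            else 3) := by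
  unfold map_builder_alt
  have hg0rows := pvG0_rows nrows ncols
  have hg0len : ((PySem.List.pyRange 0 nrows 1).map (fun _ => List.replicate ncols.toNat (3:Int))).length = nrows.toNat := by
    simp [PySem.List.length_pyRange_one]
  have hg1rows := pvFold_rows nrows ncols black 0 _ hg0rows
  have hg1len := pvFold_length nrows ncols black 0 ((PySem.List.pyRange 0 nrows 1).map (fun _ => List.replicate ncols.toNat (3:Int)))
  have hg2rows := pvFold_rows nrows ncols path 6 _ hg1rows
  have hg2len := pvFold_length nrows ncols path 6 (black.foldl (fun g p => pvPut nrows ncols g p 0) ((PySem.List.pyRange 0 nrows 1).map (fun _ => List.replicate ncols.toNat (3:Int))))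
  rw [pvPut_cell _ _ _ _ _ _ _ hg2rows, pvFold_cell _ _ _ _ _ _ _ hg1rows,
      pvFold_cell _ _ _ _ _ _ _ hg0rows]
  simp only [hg2len, hg1len, hg0len]
  have hg0cell : pvCell ((PySem.List.pyRange 0 nrows 1).map (fun _ => List.replicate ncols.toNat (3:Int))) i j = some 3 := by
    unfold pvCell
    rw [List.getElem?_eq_getElem (by simpa [hg0len] using hi)]
    simp [hj]
  rw [hg0cell]
  simp only [pvHit_iff nrows ncols start i j hi hj]
  have hmem : ∀ (L : List (Int × Int)),
      ((∃ p ∈ L, (0 ≤ p.1 ∧ p.1 < nrows ∧ 0 ≤ p.2 ∧ p.2 < ncols) ∧ p.1.toNat = i ∧ p.2.toNat = j ∧ i < nrows.toNat)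
        ↔ ((i : Int), (j : Int)) ∈ L) := by
    intro L
    constructor
    · rintro ⟨p, hp, hh⟩; rw [pvHit_iff nrows ncols p i j hi hj] at hh; exact hh ▸ hp
    · intro hL; exact ⟨_, hL, (pvHit_iff nrows ncols _ i j hi hj).mpr rfl⟩
  simp only [hmem path, hmem black]
  by_cases hs : start = ((i : Int), (j : Int))
  · rw [if_pos hs, if_pos hs.symm]
  · rw [if_neg hs, if_neg (show ¬ ((i : Int), (j : Int)) = start from fun h => hs h.symm)]
    by_cases hp : ((i : Int), (j : Int)) ∈ path
    · rw [if_pos hp, if_pos hp]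
    · rw [if_neg hp, if_neg hp]
      by_cases hb : ((i : Int), (j : Int)) ∈ black
      · rw [if_pos hb, if_pos hb]
      · rw [if_neg hb, if_neg hb]

theorem pvAlt_length (nrows ncols : Int) (black path : List (Int × Int)) (start : Int × Int) :
    (map_builder_alt nrows ncols black path start).length = nrows.toNat := by
  unfold map_builder_alt
  rw [pvPut_length, pvFold_length, pvFold_length]
  simp [PySem.List.length_pyRange_one]

theorem pvAlt_rows (nrows ncols : Int) (black path : List (Int × Int)) (start : Int × Int) :
    ∀ r ∈ map_builder_alt nrows ncols black path start, r.length = ncols.toNat := by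
  unfold map_builder_alt
  exact pvPut_rows _ _ _ _ _ (pvFold_rows _ _ _ _ _ (pvFold_rows _ _ _ _ _ (pvG0_rows nrows ncols)))

-- ===== VERDICT (by name: the statement is the Claim_ definition above) =====
theorem map_builder_spec : Claim_equal_map_builder := by
  intro nrows ncols black path start _
  unfold Spec_map_builder
  apply List.ext_getElem
  · simp [map_builder, pvAlt_length, PySem.List.length_pyRange_one]
  · intro i h1 h2
    have hi : i < nrows.toNat := by
      simpa [map_builder, PySem.List.length_pyRange_one] using h1
    apply List.ext_getElem
    · have := pvAlt_rows nrows ncols black path start _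
        (List.getElem_mem h2)
      simp [map_builder, this, PySem.List.length_pyRange_one]
    · intro j hj1 hj2
      have hjc : j < ncols.toNat := by
        have := pvAlt_rows nrows ncols black path start _ (List.getElem_mem h2)
        omega
      have hA : (map_builder nrows ncols black path start)[i][j] =
          (if ((i : Int), (j : Int)) = start then 5
           else if ((i : Int), (j : Int)) ∈ path then 6
           else if ((i : Int), (j : Int)) ∈ black then 0
           else 3) := by
        simp [map_builder, PySem.List.getElem_pyRange_one]
      have hB := pvAlt_cell nrows ncols black path start i j hi hjc
      unfold pvCell at hB
      rw [List.getElem?_eq_getElem h2] at hB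
      simp only [Option.bind_some] at hB
      rw [List.getElem?_eq_getElem hj2] at hB
      rw [hA]
      exact (Option.some_inj.mp hB.symm)
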